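-- pv_equiv track=rewrite | github.com/ezeogubright-boop/Pip-Badger | backend/app/engines/risk_engine.py | _is_correlated
-- ===== SOURCE A (Python) =====
-- def _is_correlated(symbol1: str, symbol2: str) -> bool:
--     """Check if two symbols are correlated (simplified)"""
--     # In production, use actual correlation matrix
--     correlated_groups = [
--         {'EURUSD', 'GBPUSD', 'AUDUSD', 'NZDUSD'},  # USD pairs
--         {'USDJPY', 'USDCHF', 'USDCAD'},  # USD base
--         {'XAUUSD', 'XAGUSD'},  # Metals
--         {'BTCUSD', 'ETHUSD'},  # Crypto
--     ]
--
--     for group in correlated_groups: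
--         if symbol1 in group and symbol2 in group:
--             return True
--     return False
-- ===== SOURCE B (Python) =====
-- _GROUPS = [
--     ('EURUSD', 'GBPUSD', 'AUDUSD', 'NZDUSD'),  # USD pairs
--     ('USDJPY', 'USDCHF', 'USDCAD'),            # USD base
--     ('XAUUSD', 'XAGUSD'),                      # Metals
--     ('BTCUSD', 'ETHUSD'),                      # Crypto
-- ]
-- _SYMBOL_TO_GROUP = {s: i for i, grp in enumerate(_GROUPS) for s in grp}
--
-- def _is_correlated(symbol1: str, symbol2: str) -> bool:
--     """Check if two symbols are correlated (simplified)"""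
--     g1 = _SYMBOL_TO_GROUP.get(symbol1)
--     if g1 is None:
--         return False
--     g2 = _SYMBOL_TO_GROUP.get(symbol2)
--     return g2 is not None and g1 == g2
-- ===== Notes on version B (the rewrite author's own statement) =====
-- stated objective: simpler
-- what changed: B precomputes a symbol-to-group-id dictionary once (a single comprehension over the four groups) and answers each query with two lookups and a None-guarded comparison, instead of A's per-query scan over the list of sets.
import Mathlib
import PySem

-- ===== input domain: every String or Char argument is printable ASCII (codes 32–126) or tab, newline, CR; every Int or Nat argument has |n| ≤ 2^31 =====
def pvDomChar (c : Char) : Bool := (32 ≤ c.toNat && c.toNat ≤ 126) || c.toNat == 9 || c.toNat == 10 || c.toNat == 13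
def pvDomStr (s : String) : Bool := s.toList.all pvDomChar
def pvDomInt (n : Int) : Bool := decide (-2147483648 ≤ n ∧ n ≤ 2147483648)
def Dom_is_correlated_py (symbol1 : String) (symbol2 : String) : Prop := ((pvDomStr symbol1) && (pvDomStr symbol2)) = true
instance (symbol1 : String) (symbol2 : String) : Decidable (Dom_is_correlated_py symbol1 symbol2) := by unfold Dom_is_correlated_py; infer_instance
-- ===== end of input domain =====

-- B replaces A's per-query scan over the list of sets by a precomputed symbol→group-id dict and two lookups (simpler query path; same observable behaviour).

-- ===== PORT A =====
def pvCorrelatedGroups : List (PySem.Set String) :=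
  [PySem.Set.ofList ["EURUSD", "GBPUSD", "AUDUSD", "NZDUSD"],
   PySem.Set.ofList ["USDJPY", "USDCHF", "USDCAD"],
   PySem.Set.ofList ["XAUUSD", "XAGUSD"],
   PySem.Set.ofList ["BTCUSD", "ETHUSD"]]

-- the 'for group in correlated_groups: if … return True' loop, step for step
def pvScanGroups (symbol1 : String) (symbol2 : String) : List (PySem.Set String) → Bool
  | [] => false
  | g :: rest => if symbol1 ∈ g ∧ symbol2 ∈ g then true else pvScanGroups symbol1 symbol2 rest

def is_correlated_py (symbol1 : String) (symbol2 : String) : Bool :=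
  pvScanGroups symbol1 symbol2 pvCorrelatedGroups

-- ===== PORT B =====
def pvGroupsB : List (List String) :=
  [["EURUSD", "GBPUSD", "AUDUSD", "NZDUSD"],
   ["USDJPY", "USDCHF", "USDCAD"],
   ["XAUUSD", "XAGUSD"],
   ["BTCUSD", "ETHUSD"]]

-- the dict comprehension {s: i for i, grp in enumerate(_GROUPS) for s in grp}
def pvSymbolToGroup : PySem.Dict String Int :=
  (PySem.List.enumerate pvGroupsB).foldl
    (fun d p => p.2.foldl (fun d s => d.insert s p.1) d)
    PySem.Dict.empty

def is_correlated_py_alt (symbol1 : String) (symbol2 : String) : Bool :=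
  match PySem.Dict.get? pvSymbolToGroup symbol1 with
  | none => false
  | some g1 =>
    match PySem.Dict.get? pvSymbolToGroup symbol2 with
    | none => false
    | some g2 => g1 == g2

-- ===== PRECONDITION & SPEC =====
def Spec_is_correlated_py (symbol1 : String) (symbol2 : String) (out : Bool) : Prop := out = is_correlated_py_alt symbol1 symbol2
instance (symbol1 : String) (symbol2 : String) (out : Bool) : Decidable (Spec_is_correlated_py symbol1 symbol2 out) := by unfold Spec_is_correlated_py; infer_instance

-- ===== CLAIM (what is proved, stated in full; the proofs are below) =====
def Claim_equal_is_correlated_py : Prop := ∀ (symbol1 : String) (symbol2 : String), Dom_is_correlated_py symbol1 symbol2 → Spec_is_correlated_py symbol1 symbol2 (is_correlated_py symbol1 symbol2)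

-- ===== LEMMAS AND PROOFS =====

-- the dict the comprehension builds, as a literal
lemma pvSymbolToGroup_eq :
    pvSymbolToGroup = PySem.Dict.mk
      [("EURUSD", 0), ("GBPUSD", 0), ("AUDUSD", 0), ("NZDUSD", 0),
       ("USDJPY", 1), ("USDCHF", 1), ("USDCAD", 1),
       ("XAUUSD", 2), ("XAGUSD", 2),
       ("BTCUSD", 3), ("ETHUSD", 3)] := by rfl

-- ===== VERDICT (by name: the statement is the Claim_ definition above) =====
set_option maxHeartbeats 2000000 in
theorem is_correlated_py_spec : Claim_equal_is_correlated_py := by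
  intro s1 s2 _
  unfold Spec_is_correlated_py is_correlated_py is_correlated_py_alt
  rw [pvSymbolToGroup_eq]
  by_cases h0 : s1 = "EURUSD"
  · subst h0
    by_cases k0 : s2 = "EURUSD"
    · subst k0; decide
    by_cases k1 : s2 = "GBPUSD"
    · subst k1; decide
    by_cases k2 : s2 = "AUDUSD"
    · subst k2; decide
    by_cases k3 : s2 = "NZDUSD"
    · subst k3; decide
    by_cases k4 : s2 = "USDJPY"
    · subst k4; decide
    by_cases k5 : s2 = "USDCHF"
    · subst k5; decide
    by_cases k6 : s2 = "USDCAD"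
    · subst k6; decide
    by_cases k7 : s2 = "XAUUSD"
    · subst k7; decide
    by_cases k8 : s2 = "XAGUSD"
    · subst k8; decide
    by_cases k9 : s2 = "BTCUSD"
    · subst k9; decide
    by_cases k10 : s2 = "ETHUSD"
    · subst k10; decide
    simp [pvScanGroups, pvCorrelatedGroups, PySem.Set.mem_ofList, List.mem_cons, List.not_mem_nil, PySem.Dict.get?, beq_iff_eq, k0, Ne.symm k0, k1, Ne.symm k1, k2, Ne.symm k2, k3, Ne.symm k3, k4, Ne.symm k4, k5, Ne.symm k5, k6, Ne.symm k6, k7, Ne.symm k7, k8, Ne.symm k8, k9, Ne.symm k9, k10, Ne.symm k10]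
  by_cases h1 : s1 = "GBPUSD"
  · subst h1
    by_cases k0 : s2 = "EURUSD"
    · subst k0; decide
    by_cases k1 : s2 = "GBPUSD"
    · subst k1; decide
    by_cases k2 : s2 = "AUDUSD"
    · subst k2; decide
    by_cases k3 : s2 = "NZDUSD"
    · subst k3; decide
    by_cases k4 : s2 = "USDJPY"
    · subst k4; decide
    by_cases k5 : s2 = "USDCHF"
    · subst k5; decide
    by_cases k6 : s2 = "USDCAD"
    · subst k6; decide
    by_cases k7 : s2 = "XAUUSD"
    · subst k7; decide
    by_cases k8 : s2 = "XAGUSD"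
    · subst k8; decide
    by_cases k9 : s2 = "BTCUSD"
    · subst k9; decide
    by_cases k10 : s2 = "ETHUSD"
    · subst k10; decide
    simp [pvScanGroups, pvCorrelatedGroups, PySem.Set.mem_ofList, List.mem_cons, List.not_mem_nil, PySem.Dict.get?, beq_iff_eq, k0, Ne.symm k0, k1, Ne.symm k1, k2, Ne.symm k2, k3, Ne.symm k3, k4, Ne.symm k4, k5, Ne.symm k5, k6, Ne.symm k6, k7, Ne.symm k7, k8, Ne.symm k8, k9, Ne.symm k9, k10, Ne.symm k10]
  by_cases h2 : s1 = "AUDUSD"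
  · subst h2
    by_cases k0 : s2 = "EURUSD"
    · subst k0; decide
    by_cases k1 : s2 = "GBPUSD"
    · subst k1; decide
    by_cases k2 : s2 = "AUDUSD"
    · subst k2; decide
    by_cases k3 : s2 = "NZDUSD"
    · subst k3; decide
    by_cases k4 : s2 = "USDJPY"
    · subst k4; decide
    by_cases k5 : s2 = "USDCHF"
    · subst k5; decide
    by_cases k6 : s2 = "USDCAD"
    · subst k6; decide
    by_cases k7 : s2 = "XAUUSD"
    · subst k7; decide
    by_cases k8 : s2 = "XAGUSD"
    · subst k8; decide
    by_cases k9 : s2 = "BTCUSD"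
    · subst k9; decide
    by_cases k10 : s2 = "ETHUSD"
    · subst k10; decide
    simp [pvScanGroups, pvCorrelatedGroups, PySem.Set.mem_ofList, List.mem_cons, List.not_mem_nil, PySem.Dict.get?, beq_iff_eq, k0, Ne.symm k0, k1, Ne.symm k1, k2, Ne.symm k2, k3, Ne.symm k3, k4, Ne.symm k4, k5, Ne.symm k5, k6, Ne.symm k6, k7, Ne.symm k7, k8, Ne.symm k8, k9, Ne.symm k9, k10, Ne.symm k10]
  by_cases h3 : s1 = "NZDUSD"
  · subst h3
    by_cases k0 : s2 = "EURUSD"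
    · subst k0; decide
    by_cases k1 : s2 = "GBPUSD"
    · subst k1; decide
    by_cases k2 : s2 = "AUDUSD"
    · subst k2; decide
    by_cases k3 : s2 = "NZDUSD"
    · subst k3; decide
    by_cases k4 : s2 = "USDJPY"
    · subst k4; decide
    by_cases k5 : s2 = "USDCHF"
    · subst k5; decide
    by_cases k6 : s2 = "USDCAD"
    · subst k6; decide
    by_cases k7 : s2 = "XAUUSD"
    · subst k7; decide
    by_cases k8 : s2 = "XAGUSD"
    · subst k8; decide
    by_cases k9 : s2 = "BTCUSD"
    · subst k9; decide
    by_cases k10 : s2 = "ETHUSD"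
    · subst k10; decide
    simp [pvScanGroups, pvCorrelatedGroups, PySem.Set.mem_ofList, List.mem_cons, List.not_mem_nil, PySem.Dict.get?, beq_iff_eq, k0, Ne.symm k0, k1, Ne.symm k1, k2, Ne.symm k2, k3, Ne.symm k3, k4, Ne.symm k4, k5, Ne.symm k5, k6, Ne.symm k6, k7, Ne.symm k7, k8, Ne.symm k8, k9, Ne.symm k9, k10, Ne.symm k10]
  by_cases h4 : s1 = "USDJPY"
  · subst h4
    by_cases k0 : s2 = "EURUSD"
    · subst k0; decide
    by_cases k1 : s2 = "GBPUSD"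
    · subst k1; decide
    by_cases k2 : s2 = "AUDUSD"
    · subst k2; decide
    by_cases k3 : s2 = "NZDUSD"
    · subst k3; decide
    by_cases k4 : s2 = "USDJPY"
    · subst k4; decide
    by_cases k5 : s2 = "USDCHF"
    · subst k5; decide
    by_cases k6 : s2 = "USDCAD"
    · subst k6; decide
    by_cases k7 : s2 = "XAUUSD"
    · subst k7; decide
    by_cases k8 : s2 = "XAGUSD"
    · subst k8; decide
    by_cases k9 : s2 = "BTCUSD"
    · subst k9; decide
    by_cases k10 : s2 = "ETHUSD"
    · subst k10; decide
    simp [pvScanGroups, pvCorrelatedGroups, PySem.Set.mem_ofList, List.mem_cons, List.not_mem_nil, PySem.Dict.get?, beq_iff_eq, k0, Ne.symm k0, k1, Ne.symm k1, k2, Ne.symm k2, k3, Ne.symm k3, k4, Ne.symm k4, k5, Ne.symm k5, k6, Ne.symm k6, k7, Ne.symm k7, k8, Ne.symm k8, k9, Ne.symm k9, k10, Ne.symm k10]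
  by_cases h5 : s1 = "USDCHF"
  · subst h5
    by_cases k0 : s2 = "EURUSD"
    · subst k0; decide
    by_cases k1 : s2 = "GBPUSD"
    · subst k1; decide
    by_cases k2 : s2 = "AUDUSD"
    · subst k2; decide
    by_cases k3 : s2 = "NZDUSD"
    · subst k3; decide
    by_cases k4 : s2 = "USDJPY"
    · subst k4; decide
    by_cases k5 : s2 = "USDCHF"
    · subst k5; decide
    by_cases k6 : s2 = "USDCAD"
    · subst k6; decide
    by_cases k7 : s2 = "XAUUSD"
    · subst k7; decide
    by_cases k8 : s2 = "XAGUSD"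
    · subst k8; decide
    by_cases k9 : s2 = "BTCUSD"
    · subst k9; decide
    by_cases k10 : s2 = "ETHUSD"
    · subst k10; decide
    simp [pvScanGroups, pvCorrelatedGroups, PySem.Set.mem_ofList, List.mem_cons, List.not_mem_nil, PySem.Dict.get?, beq_iff_eq, k0, Ne.symm k0, k1, Ne.symm k1, k2, Ne.symm k2, k3, Ne.symm k3, k4, Ne.symm k4, k5, Ne.symm k5, k6, Ne.symm k6, k7, Ne.symm k7, k8, Ne.symm k8, k9, Ne.symm k9, k10, Ne.symm k10]
  by_cases h6 : s1 = "USDCAD"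
  · subst h6
    by_cases k0 : s2 = "EURUSD"
    · subst k0; decide
    by_cases k1 : s2 = "GBPUSD"
    · subst k1; decide
    by_cases k2 : s2 = "AUDUSD"
    · subst k2; decide
    by_cases k3 : s2 = "NZDUSD"
    · subst k3; decide
    by_cases k4 : s2 = "USDJPY"
    · subst k4; decide
    by_cases k5 : s2 = "USDCHF"
    · subst k5; decide
    by_cases k6 : s2 = "USDCAD"
    · subst k6; decide
    by_cases k7 : s2 = "XAUUSD"
    · subst k7; decide
    by_cases k8 : s2 = "XAGUSD"
    · subst k8; decide
    by_cases k9 : s2 = "BTCUSD"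
    · subst k9; decide
    by_cases k10 : s2 = "ETHUSD"
    · subst k10; decide
    simp [pvScanGroups, pvCorrelatedGroups, PySem.Set.mem_ofList, List.mem_cons, List.not_mem_nil, PySem.Dict.get?, beq_iff_eq, k0, Ne.symm k0, k1, Ne.symm k1, k2, Ne.symm k2, k3, Ne.symm k3, k4, Ne.symm k4, k5, Ne.symm k5, k6, Ne.symm k6, k7, Ne.symm k7, k8, Ne.symm k8, k9, Ne.symm k9, k10, Ne.symm k10]
  by_cases h7 : s1 = "XAUUSD"
  · subst h7
    by_cases k0 : s2 = "EURUSD"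
    · subst k0; decide
    by_cases k1 : s2 = "GBPUSD"
    · subst k1; decide
    by_cases k2 : s2 = "AUDUSD"
    · subst k2; decide
    by_cases k3 : s2 = "NZDUSD"
    · subst k3; decide
    by_cases k4 : s2 = "USDJPY"
    · subst k4; decide
    by_cases k5 : s2 = "USDCHF"
    · subst k5; decide
    by_cases k6 : s2 = "USDCAD"
    · subst k6; decide
    by_cases k7 : s2 = "XAUUSD"
    · subst k7; decide
    by_cases k8 : s2 = "XAGUSD"
    · subst k8; decide
    by_cases k9 : s2 = "BTCUSD"
    · subst k9; decide
    by_cases k10 : s2 = "ETHUSD"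
    · subst k10; decide
    simp [pvScanGroups, pvCorrelatedGroups, PySem.Set.mem_ofList, List.mem_cons, List.not_mem_nil, PySem.Dict.get?, beq_iff_eq, k0, Ne.symm k0, k1, Ne.symm k1, k2, Ne.symm k2, k3, Ne.symm k3, k4, Ne.symm k4, k5, Ne.symm k5, k6, Ne.symm k6, k7, Ne.symm k7, k8, Ne.symm k8, k9, Ne.symm k9, k10, Ne.symm k10]
  by_cases h8 : s1 = "XAGUSD"
  · subst h8
    by_cases k0 : s2 = "EURUSD"
    · subst k0; decide
    by_cases k1 : s2 = "GBPUSD"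
    · subst k1; decide
    by_cases k2 : s2 = "AUDUSD"
    · subst k2; decide
    by_cases k3 : s2 = "NZDUSD"
    · subst k3; decide
    by_cases k4 : s2 = "USDJPY"
    · subst k4; decide
    by_cases k5 : s2 = "USDCHF"
    · subst k5; decide
    by_cases k6 : s2 = "USDCAD"
    · subst k6; decide
    by_cases k7 : s2 = "XAUUSD"
    · subst k7; decide
    by_cases k8 : s2 = "XAGUSD"
    · subst k8; decide
    by_cases k9 : s2 = "BTCUSD"
    · subst k9; decide
    by_cases k10 : s2 = "ETHUSD"
    · subst k10; decide
    simp [pvScanGroups, pvCorrelatedGroups, PySem.Set.mem_ofList, List.mem_cons, List.not_mem_nil, PySem.Dict.get?, beq_iff_eq, k0, Ne.symm k0, k1, Ne.symm k1, k2, Ne.symm k2, k3, Ne.symm k3, k4, Ne.symm k4, k5, Ne.symm k5, k6, Ne.symm k6, k7, Ne.symm k7, k8, Ne.symm k8, k9, Ne.symm k9, k10, Ne.symm k10]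
  by_cases h9 : s1 = "BTCUSD"
  · subst h9
    by_cases k0 : s2 = "EURUSD"
    · subst k0; decide
    by_cases k1 : s2 = "GBPUSD"
    · subst k1; decide
    by_cases k2 : s2 = "AUDUSD"
    · subst k2; decide
    by_cases k3 : s2 = "NZDUSD"
    · subst k3; decide
    by_cases k4 : s2 = "USDJPY"
    · subst k4; decide
    by_cases k5 : s2 = "USDCHF"
    · subst k5; decide
    by_cases k6 : s2 = "USDCAD"
    · subst k6; decide
    by_cases k7 : s2 = "XAUUSD"
    · subst k7; decide
    by_cases k8 : s2 = "XAGUSD"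
    · subst k8; decide
    by_cases k9 : s2 = "BTCUSD"
    · subst k9; decide
    by_cases k10 : s2 = "ETHUSD"
    · subst k10; decide
    simp [pvScanGroups, pvCorrelatedGroups, PySem.Set.mem_ofList, List.mem_cons, List.not_mem_nil, PySem.Dict.get?, beq_iff_eq, k0, Ne.symm k0, k1, Ne.symm k1, k2, Ne.symm k2, k3, Ne.symm k3, k4, Ne.symm k4, k5, Ne.symm k5, k6, Ne.symm k6, k7, Ne.symm k7, k8, Ne.symm k8, k9, Ne.symm k9, k10, Ne.symm k10]
  by_cases h10 : s1 = "ETHUSD"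
  · subst h10
    by_cases k0 : s2 = "EURUSD"
    · subst k0; decide
    by_cases k1 : s2 = "GBPUSD"
    · subst k1; decide
    by_cases k2 : s2 = "AUDUSD"
    · subst k2; decide
    by_cases k3 : s2 = "NZDUSD"
    · subst k3; decide
    by_cases k4 : s2 = "USDJPY"
    · subst k4; decide
    by_cases k5 : s2 = "USDCHF"
    · subst k5; decide
    by_cases k6 : s2 = "USDCAD"
    · subst k6; decide
    by_cases k7 : s2 = "XAUUSD"
    · subst k7; decide
    by_cases k8 : s2 = "XAGUSD"
    · subst k8; decide
    by_cases k9 : s2 = "BTCUSD"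
    · subst k9; decide
    by_cases k10 : s2 = "ETHUSD"
    · subst k10; decide
    simp [pvScanGroups, pvCorrelatedGroups, PySem.Set.mem_ofList, List.mem_cons, List.not_mem_nil, PySem.Dict.get?, beq_iff_eq, k0, Ne.symm k0, k1, Ne.symm k1, k2, Ne.symm k2, k3, Ne.symm k3, k4, Ne.symm k4, k5, Ne.symm k5, k6, Ne.symm k6, k7, Ne.symm k7, k8, Ne.symm k8, k9, Ne.symm k9, k10, Ne.symm k10]
  simp [pvScanGroups, pvCorrelatedGroups, PySem.Set.mem_ofList, List.mem_cons, List.not_mem_nil, PySem.Dict.get?, beq_iff_eq, h0, Ne.symm h0, h1, Ne.symm h1, h2, Ne.symm h2, h3, Ne.symm h3, h4, Ne.symm h4, h5, Ne.symm h5, h6, Ne.symm h6, h7, Ne.symm h7, h8, Ne.symm h8, h9, Ne.symm h9, h10, Ne.symm h10]
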